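-- pv_equiv track=rewrite | github.com/himanshibansal-max/agent-loop-harness | mcp_tools/server.py | _compute_user_stats
-- ===== SOURCE A (Python) =====
-- from collections import Counter, defaultdict
--
-- def _compute_user_stats(violations: list) -> dict:
--     stats: dict = defaultdict(lambda: {"HIGH": 0, "MEDIUM": 0, "LOW": 0, "total": 0})
--     for v in violations:
--         u = v.get("employee")
--         if not u:
--             continue
--         sev = v.get("severity", "LOW")
--         if sev not in ("HIGH", "MEDIUM", "LOW"):
--             sev = "LOW"
--         stats[u][sev] += 1
--         stats[u]["total"] += 1
--     return stats
-- ===== SOURCE B (Python) =====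
-- from collections import defaultdict
--
--
-- def _compute_user_stats(violations: list) -> dict:
--     # Phase 1: group the normalized severities by employee.
--     groups = defaultdict(list)
--     for v in violations:
--         u = v.get("employee")
--         if u:
--             sev = v.get("severity", "LOW")
--             groups[u].append(sev if sev in ("HIGH", "MEDIUM", "LOW") else "LOW")
--     # Phase 2: build each employee's record from its collected severities.
--     stats: dict = defaultdict(lambda: {"HIGH": 0, "MEDIUM": 0, "LOW": 0, "total": 0})
--     for u, sevs in groups.items():
--         stats[u] = {
--             "HIGH": sevs.count("HIGH"),
--             "MEDIUM": sevs.count("MEDIUM"),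
--             "LOW": sevs.count("LOW"),
--             "total": len(sevs),
--         }
--     return stats
-- ===== Notes on version B (the rewrite author's own statement) =====
-- stated objective: alternative
-- what changed: Replaces A's single pass of per-record defaultdict increments with a two-phase decomposition: one pass groups normalized severities per employee, then each employee's record is built at once by counting its collected severities.
import Mathlib
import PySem

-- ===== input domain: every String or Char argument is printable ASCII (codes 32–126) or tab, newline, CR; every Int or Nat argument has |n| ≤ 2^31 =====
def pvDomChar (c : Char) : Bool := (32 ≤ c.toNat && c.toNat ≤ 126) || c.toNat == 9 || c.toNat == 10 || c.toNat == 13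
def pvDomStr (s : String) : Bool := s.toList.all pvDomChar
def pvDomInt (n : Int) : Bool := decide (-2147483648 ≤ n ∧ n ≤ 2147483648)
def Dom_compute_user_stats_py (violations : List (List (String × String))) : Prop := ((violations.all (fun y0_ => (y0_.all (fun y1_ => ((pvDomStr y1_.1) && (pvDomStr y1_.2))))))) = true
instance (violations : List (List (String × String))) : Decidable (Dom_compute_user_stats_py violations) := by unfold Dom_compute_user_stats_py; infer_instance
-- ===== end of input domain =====

-- B replaces A's single incremental-increment pass with a two-phase decomposition
-- (group normalized severities per employee, then build each record by counting);
-- the equality proved is about the returned dict (rendered as an association list).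

-- ===== PORT A =====
-- loop body of A's single pass (stats[u][sev] += 1; stats[u]["total"] += 1 on a defaultdict)
def pvAStep (stats : PySem.Dict String (PySem.Dict String Int))
    (v : List (String × String)) : PySem.Dict String (PySem.Dict String Int) :=
  match (PySem.Dict.ofList v).get? "employee" with
  | none => stats                       -- `if not u: continue` (key missing)
  | some u =>
    if u = "" then stats                -- `if not u: continue` (empty string is falsy)
    else
      let sev := (PySem.Dict.ofList v).getD "severity" "LOW"
      let sev := if ¬ (sev = "HIGH" ∨ sev = "MEDIUM" ∨ sev = "LOW") then "LOW" else sev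
      -- defaultdict access stats[u]: existing inner dict or the factory's fresh record
      let inner := stats.getD u (PySem.Dict.ofList [("HIGH", (0 : Int)), ("MEDIUM", 0), ("LOW", 0), ("total", 0)])
      let inner := inner.modify sev 0 (· + 1)
      let inner := inner.modify "total" 0 (· + 1)
      stats.insert u inner

def compute_user_stats_py (violations : List (List (String × String))) : List (String × List (String × Int)) :=
  let stats := violations.foldl pvAStep PySem.Dict.empty
  stats.items.map (fun p => (p.1, p.2.items))

-- ===== PORT B =====
-- `sev if sev in ("HIGH","MEDIUM","LOW") else "LOW"` applied to v.get("severity","LOW")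
def pvNormSev (v : List (String × String)) : String :=
  let sev := (PySem.Dict.ofList v).getD "severity" "LOW"
  if sev = "HIGH" ∨ sev = "MEDIUM" ∨ sev = "LOW" then sev else "LOW"

-- phase-1 loop body: groups[u].append(normalized severity)
def pvBStep (g : PySem.Dict String (List String))
    (v : List (String × String)) : PySem.Dict String (List String) :=
  match (PySem.Dict.ofList v).get? "employee" with
  | none => g
  | some u => if u = "" then g else g.modify u [] (· ++ [pvNormSev v])

-- phase-2 record for one employee
def pvRecord (sevs : List String) : List (String × Int) :=
  [("HIGH", (PySem.List.count sevs "HIGH" : Int)),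
   ("MEDIUM", (PySem.List.count sevs "MEDIUM" : Int)),
   ("LOW", (PySem.List.count sevs "LOW" : Int)),
   ("total", (sevs.length : Int))]

def compute_user_stats_py_alt (violations : List (List (String × String))) : List (String × List (String × Int)) :=
  let groups := violations.foldl pvBStep PySem.Dict.empty
  let stats := groups.items.foldl
    (fun (st : PySem.Dict String (List (String × Int))) p => st.insert p.1 (pvRecord p.2))
    PySem.Dict.empty
  stats.items

-- ===== PRECONDITION & SPEC =====
def Spec_compute_user_stats_py (violations : List (List (String × String))) (out : List (String × List (String × Int))) : Prop := out = compute_user_stats_py_alt violations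
instance (violations : List (List (String × String))) (out : List (String × List (String × Int))) : Decidable (Spec_compute_user_stats_py violations out) := by unfold Spec_compute_user_stats_py; infer_instance

-- ===== CLAIM (what is proved, stated in full; the proofs are below) =====
def Claim_equal_compute_user_stats_py : Prop := ∀ (violations : List (List (String × String))), Dom_compute_user_stats_py violations → Spec_compute_user_stats_py violations (compute_user_stats_py violations)

-- ===== LEMMAS AND PROOFS =====

-- the counts dict A maintains for an employee whose severities so far are `sevs`
def pvInner (sevs : List String) : PySem.Dict String Int := PySem.Dict.ofList (pvRecord sevs)

-- A's state as a function of B's grouping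
def pvStatsOf (g : PySem.Dict String (List String)) : PySem.Dict String (PySem.Dict String Int) :=
  PySem.Dict.mk (g.items.map (fun p => (p.1, pvInner p.2)))

theorem pv_map_get? {α β : Type} (f : α → β) (l : List (String × α)) (k : String) :
    (PySem.Dict.mk (l.map (fun p => (p.1, f p.2)))).get? k = ((PySem.Dict.mk l).get? k).map f := by
  induction l with
  | nil => rfl
  | cons p l ih =>
    show (PySem.Dict.mk ((p.1, f p.2) :: l.map (fun p => (p.1, f p.2)))).get? k = _
    rw [PySem.Dict.get?_mk_cons, PySem.Dict.get?_mk_cons]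
    by_cases h : (p.1 == k) = true <;> simp [h, ih]

theorem pv_map_insert {α β : Type} (f : α → β) (l : List (String × α)) (k : String) (x : α) :
    (PySem.Dict.mk (l.map (fun p => (p.1, f p.2)))).insert k (f x)
      = PySem.Dict.mk (((PySem.Dict.mk l).insert k x).items.map (fun p => (p.1, f p.2))) := by
  apply PySem.Dict.ext
  rw [PySem.Dict.items_insert, PySem.Dict.items_insert]
  have hc : (PySem.Dict.mk (l.map (fun p => (p.1, f p.2)))).contains k = (PySem.Dict.mk l).contains k := by
    simp only [PySem.Dict.contains_mk, List.any_map, Function.comp_def]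
  rw [hc]
  by_cases h : (PySem.Dict.mk l).contains k = true
  · simp only [h, if_true, List.map_map]
    apply List.map_congr_left
    intro p _
    by_cases hp : p.1 = k <;> simp [Function.comp, hp]
  · simp [h]

theorem pv_getD_statsOf (g : PySem.Dict String (List String)) (u : String) :
    (pvStatsOf g).getD u (PySem.Dict.ofList [("HIGH", (0 : Int)), ("MEDIUM", 0), ("LOW", 0), ("total", 0)])
      = pvInner (g.getD u []) := by
  rw [PySem.Dict.getD_eq_get?_getD, PySem.Dict.getD_eq_get?_getD]
  show ((PySem.Dict.mk (g.items.map (fun p => (p.1, pvInner p.2)))).get? u).getD _ = _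
  rw [pv_map_get?]
  cases h : (PySem.Dict.mk g.items).get? u with
  | none => rfl
  | some l => rfl

-- the two `modify`s push one normalized severity into the counts record
theorem pv_inner_step (l : List String) (s : String)
    (hs : s = "HIGH" ∨ s = "MEDIUM" ∨ s = "LOW") :
    ((pvInner l).modify s 0 (· + 1)).modify "total" 0 (· + 1) = pvInner (l ++ [s]) := by
  have key : ∀ (a b c t : Int) (s : String), s = "HIGH" ∨ s = "MEDIUM" ∨ s = "LOW" →
      ((PySem.Dict.ofList [("HIGH", a), ("MEDIUM", b), ("LOW", c), ("total", t)]).modify s 0 (· + 1)).modify "total" 0 (· + 1)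
        = PySem.Dict.ofList
            [("HIGH", a + if s = "HIGH" then 1 else 0),
             ("MEDIUM", b + if s = "MEDIUM" then 1 else 0),
             ("LOW", c + if s = "LOW" then 1 else 0), ("total", t + 1)] := by
    rintro a b c t s (h | h | h) <;> subst h <;> simp <;> rfl
  rw [show pvInner l = PySem.Dict.ofList [("HIGH", (PySem.List.count l "HIGH" : Int)),
        ("MEDIUM", (PySem.List.count l "MEDIUM" : Int)), ("LOW", (PySem.List.count l "LOW" : Int)),
        ("total", (l.length : Int))] from rfl,
      key _ _ _ _ s hs]
  unfold pvInner pvRecord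
  simp only [PySem.List.count_eq, List.count_append, List.length_append, List.count_singleton,
    List.length_singleton]
  rcases hs with h | h | h <;> subst h <;> norm_num [List.count_cons] <;> simp

-- A's normalization equals B's
theorem pv_norm_eq (v : List (String × String)) :
    (if ¬ (((PySem.Dict.ofList v).getD "severity" "LOW") = "HIGH" ∨
           ((PySem.Dict.ofList v).getD "severity" "LOW") = "MEDIUM" ∨
           ((PySem.Dict.ofList v).getD "severity" "LOW") = "LOW")
       then "LOW" else ((PySem.Dict.ofList v).getD "severity" "LOW")) = pvNormSev v := by
  unfold pvNormSev
  by_cases h : ((PySem.Dict.ofList v).getD "severity" "LOW") = "HIGH" ∨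
      ((PySem.Dict.ofList v).getD "severity" "LOW") = "MEDIUM" ∨
      ((PySem.Dict.ofList v).getD "severity" "LOW") = "LOW" <;> simp [h]

theorem pv_norm_mem (v : List (String × String)) :
    pvNormSev v = "HIGH" ∨ pvNormSev v = "MEDIUM" ∨ pvNormSev v = "LOW" := by
  unfold pvNormSev
  by_cases h : ((PySem.Dict.ofList v).getD "severity" "LOW") = "HIGH" ∨
      ((PySem.Dict.ofList v).getD "severity" "LOW") = "MEDIUM" ∨
      ((PySem.Dict.ofList v).getD "severity" "LOW") = "LOW" <;> simp [h]

theorem pv_step (g : PySem.Dict String (List String)) (v : List (String × String)) :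
    pvAStep (pvStatsOf g) v = pvStatsOf (pvBStep g v) := by
  unfold pvAStep pvBStep
  cases hu : (PySem.Dict.ofList v).get? "employee" with
  | none => rfl
  | some u =>
    by_cases h : u = ""
    · simp [h]
    · simp only [h, if_false]
      rw [pv_getD_statsOf, pv_norm_eq, pv_inner_step _ _ (pv_norm_mem v)]
      show (pvStatsOf g).insert u (pvInner (g.getD u [] ++ [pvNormSev v])) = _
      have : g.modify u [] (· ++ [pvNormSev v]) = g.insert u (g.getD u [] ++ [pvNormSev v]) := rfl
      rw [this]
      exact pv_map_insert pvInner g.items u (g.getD u [] ++ [pvNormSev v])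

theorem pv_invariant (vs : List (List (String × String))) :
    ∀ (g : PySem.Dict String (List String)),
      vs.foldl pvAStep (pvStatsOf g) = pvStatsOf (vs.foldl pvBStep g) := by
  induction vs with
  | nil => intro g; rfl
  | cons v vs ih =>
    intro g
    simp only [List.foldl_cons, pv_step, ih]

theorem pv_nodup_keys_bStep (g : PySem.Dict String (List String)) (v : List (String × String))
    (h : g.keys.Nodup) : (pvBStep g v).keys.Nodup := by
  unfold pvBStep
  cases (PySem.Dict.ofList v).get? "employee" with
  | none => exact h
  | some u =>
    by_cases hu : u = ""
    · simpa [hu]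
    · simp only [hu, if_false]
      have : g.modify u [] (· ++ [pvNormSev v]) = g.insert u (g.getD u [] ++ [pvNormSev v]) := rfl
      rw [this]
      exact PySem.Dict.nodup_keys_insert _ _ _ h

theorem pv_nodup_keys_groups (vs : List (List (String × String))) :
    ∀ (g : PySem.Dict String (List String)), g.keys.Nodup →
      (vs.foldl pvBStep g).keys.Nodup := by
  induction vs with
  | nil => intro g h; exact h
  | cons v vs ih =>
    intro g h
    exact ih _ (pv_nodup_keys_bStep g v h)

-- ===== VERDICT (by name: the statement is the Claim_ definition above) =====
theorem compute_user_stats_py_spec : Claim_equal_compute_user_stats_py := by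
  intro violations _
  show compute_user_stats_py violations = compute_user_stats_py_alt violations
  unfold compute_user_stats_py compute_user_stats_py_alt
  have h0 : (PySem.Dict.empty : PySem.Dict String (PySem.Dict String Int))
      = pvStatsOf PySem.Dict.empty := rfl
  rw [h0, pv_invariant]
  set g := violations.foldl pvBStep PySem.Dict.empty with hg
  have hnd : g.keys.Nodup := pv_nodup_keys_groups violations PySem.Dict.empty (by simp)
  have hfresh : ∀ p ∈ g.items, (PySem.Dict.empty : PySem.Dict String (List (String × Int))).contains p.1 = false := by
    intro p _; simp
  have hndk : (g.items.map (fun p => p.1)).Nodup := hnd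
  have hB : (g.items.foldl
        (fun (st : PySem.Dict String (List (String × Int))) p => st.insert p.1 (pvRecord p.2))
        PySem.Dict.empty).items
      = g.items.map (fun p => (p.1, pvRecord p.2)) := by
    rw [PySem.Dict.items_foldl_insert_fresh g.items (fun p => p.1) (fun p => pvRecord p.2)
      PySem.Dict.empty hfresh hndk]
    rfl
  rw [hB]
  show (pvStatsOf g).items.map (fun p => (p.1, p.2.items)) = _
  unfold pvStatsOf
  simp only [List.map_map]
  apply List.map_congr_left
  intro p _
  rfl
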